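-- pv_equiv track=rewrite | github.com/CorentinMartinez/TD1-scrabble | TD1.py | motpossiblejoker
-- ===== SOURCE A (Python) =====
-- def motpossible(tirage,mot):
--     t=0
--     r=[]
--     l=tirage.copy() #on crée une copie qu'on peut modifier sans problème (si on touche à tirage ça posera problème dans le programme plus grand mot
--     for c in mot:
--         if c not in l:
--             return False
--         l.remove(c) #comme ça on ne réutilise pas 2 fois la même lettre du tirage
--     return True
--
-- def motpossiblejoker(tirage,mot):
--     t=0
--     joker=1
--     l=tirage.copy()
--     if '?' in tirage:
--         for c in mot:
--             if c not in l and joker==0: #joker utilisé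
--                 return False
--             if c not in l and joker==1: #joker pas encore utilisé
--                 joker=joker-1
--             if c in l: #pour ne pas utiliser 2 fois la même lettre du tirage
--                 l.remove(c)
--         return True
--     else: #cas ou on a pas de joker dans notre tirage donc on peut réutiliser le programme précédent
--         return motpossible(tirage,mot)
-- ===== SOURCE B (Python) =====
-- def motpossiblejoker(tirage, mot):
--     # multiset algebra: total deficit of letters vs the rack, joker grants one free letter
--     manque = sum(max(0, mot.count(c) - tirage.count(c)) for c in set(mot))
--     return manque <= (1 if '?' in tirage else 0)
-- ===== Notes on version B (the rewrite author's own statement) =====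
-- stated objective: simpler
-- what changed: Replaces the rack-copy/greedy-removal loop with two branches by a single multiset-deficit formula: sum over distinct letters of max(0, needed - available), compared against the joker allowance.
import Mathlib
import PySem

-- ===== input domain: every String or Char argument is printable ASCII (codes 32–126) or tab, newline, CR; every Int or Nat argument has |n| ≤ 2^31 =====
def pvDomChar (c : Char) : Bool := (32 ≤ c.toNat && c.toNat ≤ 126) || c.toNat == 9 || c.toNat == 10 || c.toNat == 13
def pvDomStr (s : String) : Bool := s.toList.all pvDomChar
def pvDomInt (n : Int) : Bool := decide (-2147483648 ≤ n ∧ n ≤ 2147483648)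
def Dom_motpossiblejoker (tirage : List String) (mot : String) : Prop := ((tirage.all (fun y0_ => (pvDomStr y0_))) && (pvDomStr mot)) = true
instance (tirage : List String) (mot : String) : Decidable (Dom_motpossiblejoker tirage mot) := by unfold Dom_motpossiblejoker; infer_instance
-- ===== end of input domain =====

-- B replaces A's rack-copy/greedy-removal loop (with separate joker and no-joker branches)
-- by a single multiset-deficit sum compared against the joker allowance (objective: simpler).

-- ===== PORT A =====
-- the for-loop of motpossible: state is the mutable copy l of the rack
def mpGo (l : List String) (cs : List Char) : Bool :=
  match cs with
  | [] => true
  | c :: cs =>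
    let s := String.mk [c]                -- iterating a str yields 1-char strings
    if s ∈ l then mpGo (l.erase s) cs     -- l.remove(c): erase first occurrence
    else false

def motpossible (tirage : List String) (mot : String) : Bool :=
  mpGo tirage mot.toList                  -- tirage.copy() is the value itself here

-- the for-loop of motpossiblejoker's joker branch: state is (l, joker)
def mpjGo (l : List String) (joker : Int) (cs : List Char) : Bool :=
  match cs with
  | [] => true
  | c :: cs =>
    let s := String.mk [c]
    if s ∉ l ∧ joker = 0 then false
    else
      let joker' := if s ∉ l ∧ joker = 1 then joker - 1 else joker
      let l' := if s ∈ l then l.erase s else l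
      mpjGo l' joker' cs

def motpossiblejoker (tirage : List String) (mot : String) : Bool :=
  if "?" ∈ tirage then mpjGo tirage 1 mot.toList
  else motpossible tirage mot

-- ===== PORT B =====
def motpossiblejoker_alt (tirage : List String) (mot : String) : Bool :=
  let mls := mot.toList.map (fun c => String.mk [c])
  -- sum(max(0, mot.count(c) - tirage.count(c)) for c in set(mot)); Nat subtraction IS max(0, a-b)
  let manque := (PySem.Set.ofList mls).foldl
      (fun acc s => acc + (mls.count s - tirage.count s)) 0
  manque ≤ (if "?" ∈ tirage then 1 else 0)

-- ===== PRECONDITION & SPEC =====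
def Spec_motpossiblejoker (tirage : List String) (mot : String) (out : Bool) : Prop := out = motpossiblejoker_alt tirage mot
instance (tirage : List String) (mot : String) (out : Bool) : Decidable (Spec_motpossiblejoker tirage mot out) := by unfold Spec_motpossiblejoker; infer_instance

-- ===== CLAIM (what is proved, stated in full; the proofs are below) =====
def Claim_equal_motpossiblejoker : Prop := ∀ (tirage : List String) (mot : String), Dom_motpossiblejoker tirage mot → Spec_motpossiblejoker tirage mot (motpossiblejoker tirage mot)

-- ===== LEMMAS AND PROOFS =====

-- the common yardstick: card of the truncated multiset difference (letters of mot missing from the rack)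
def pvDef (ms l : List String) : Nat := ((ms : Multiset String) - (l : Multiset String)).card

theorem pvDef_cons_mem {a : String} {ms l : List String} (h : a ∈ l) :
    pvDef (a :: ms) l = pvDef ms (l.erase a) := by
  unfold pvDef
  have hc : 1 ≤ List.count a l := List.count_pos_iff.mpr h
  congr 1
  ext t
  rw [Multiset.count_sub, Multiset.count_sub, ← Multiset.cons_coe, Multiset.count_cons,
    ← Multiset.coe_erase, Multiset.coe_count, Multiset.coe_count]
  by_cases ht : t = a
  · subst ht
    rw [Multiset.count_erase_self, Multiset.coe_count]
    simp
    omega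
  · rw [Multiset.count_erase_of_ne ht, Multiset.coe_count]
    simp [ht]

theorem pvDef_cons_not_mem {a : String} {ms l : List String} (h : a ∉ l) :
    pvDef (a :: ms) l = pvDef ms l + 1 := by
  unfold pvDef
  have hc : List.count a l = 0 := List.count_eq_zero.mpr h
  have : ((a :: ms : List String) : Multiset String) - (l : Multiset String)
       = a ::ₘ ((ms : Multiset String) - (l : Multiset String)) := by
    ext t
    rw [Multiset.count_sub, ← Multiset.cons_coe, Multiset.count_cons, Multiset.count_cons,
      Multiset.count_sub, Multiset.coe_count, Multiset.coe_count]
    by_cases ht : t = a <;> simp [ht, hc] <;> try omega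
  rw [this, Multiset.card_cons]

def pvChars (cs : List Char) : List String := cs.map (fun c => String.mk [c])

-- A's joker loop decides 'deficit ≤ joker' (for joker ∈ {0,1})
theorem mpjGo_eq (cs : List Char) : ∀ (l : List String) (j : Int), j = 0 ∨ j = 1 →
    mpjGo l j cs = decide (pvDef (pvChars cs) l ≤ j.toNat) := by
  induction cs with
  | nil => intro l j _; simp [mpjGo, pvChars, pvDef]
  | cons c cs ih =>
    intro l j hj
    by_cases hm : String.mk [c] ∈ l
    · have h1 : ¬ (String.mk [c] ∉ l ∧ j = 0) := by tauto
      have h2 : ¬ (String.mk [c] ∉ l ∧ j = 1) := by tauto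
      simp only [mpjGo, if_neg h1, if_neg h2, if_pos hm, ih _ j hj, pvChars, List.map_cons,
        pvDef_cons_mem hm]
      rfl
    · rcases hj with h0 | h1
      · subst h0
        simp only [mpjGo, if_pos (show (String.mk [c] ∉ l ∧ (0 : Int) = 0) from ⟨hm, rfl⟩),
          pvChars, List.map_cons, pvDef_cons_not_mem hm]
        simp [hm]
      · subst h1
        have hne : ¬ (String.mk [c] ∉ l ∧ (1 : Int) = 0) := by simp [hm]
        simp only [mpjGo, if_neg hne,
          if_pos (show (String.mk [c] ∉ l ∧ (1 : Int) = 1) from ⟨hm, rfl⟩), if_neg hm]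
        have hz : (if String.mk [c] ∉ l ∧ True then (1 : Int) - 1 else 1) = 0 := by simp [hm]
        rw [hz, ih _ 0 (Or.inl rfl)]
        simp [pvChars, pvDef_cons_not_mem hm]

-- motpossible's loop is the joker loop with joker = 0
theorem mpGo_eq_mpjGo (cs : List Char) : ∀ (l : List String),
    mpGo l cs = mpjGo l 0 cs := by
  induction cs with
  | nil => intro l; rfl
  | cons c cs ih =>
    intro l
    by_cases hm : String.mk [c] ∈ l
    · simp [mpGo, mpjGo, hm, ih]
    · simp [mpGo, mpjGo, hm]

theorem pvFoldl_add (f : String → Nat) (l : List String) : ∀ (a : Nat),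
    l.foldl (fun acc s => acc + f s) a = a + (l.map f).sum := by
  induction l with
  | nil => intro a; simp
  | cons x l ih => intro a; simp [List.foldl_cons, ih]; omega

-- B's set-indexed sum is the multiset-difference cardinality
theorem pvSum_eq_pvDef (mls tirage : List String) :
    (PySem.Set.ofList mls).foldl (fun acc s => acc + (mls.count s - tirage.count s)) 0
      = pvDef mls tirage := by
  rw [pvFoldl_add, Nat.zero_add]
  have hnd : (PySem.Set.ofList mls).Nodup := PySem.Set.nodup_ofList mls
  have hfin : (PySem.Set.ofList mls).toFinset = mls.toFinset := by
    ext x; simp [PySem.Set.mem_ofList]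
  rw [← List.sum_toFinset _ hnd, hfin]
  unfold pvDef
  have hsub : ((mls : Multiset String) - (tirage : Multiset String)).toFinset ⊆ mls.toFinset := by
    intro x hx
    simp only [Multiset.mem_toFinset, List.mem_toFinset] at hx ⊢
    have h1 := Multiset.count_pos.mpr hx
    rw [Multiset.count_sub] at h1
    have h2 : 0 < Multiset.count x (mls : Multiset String) := by omega
    exact Multiset.mem_coe.mp (Multiset.count_pos.mp h2)
  have hzero : ∀ x ∈ mls.toFinset,
      x ∉ ((mls : Multiset String) - (tirage : Multiset String)).toFinset →
      Multiset.count x ((mls : Multiset String) - (tirage : Multiset String)) = 0 := by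
    intro x _ hx
    simp only [Multiset.mem_toFinset] at hx
    exact Multiset.count_eq_zero.mpr hx
  rw [← Multiset.toFinset_sum_count_eq ((mls : Multiset String) - (tirage : Multiset String)),
      Finset.sum_subset hsub hzero]
  apply Finset.sum_congr rfl
  intro x _
  rw [Multiset.count_sub, Multiset.coe_count, Multiset.coe_count]

-- ===== VERDICT (by name: the statement is the Claim_ definition above) =====
theorem motpossiblejoker_spec : Claim_equal_motpossiblejoker := by
  intro tirage mot _
  unfold Spec_motpossiblejoker motpossiblejoker motpossiblejoker_alt motpossible
  simp only [pvSum_eq_pvDef]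
  by_cases hq : "?" ∈ tirage
  · rw [if_pos hq, if_pos hq, mpjGo_eq _ _ 1 (Or.inr rfl)]
    simp [pvChars]
  · rw [if_neg hq, if_neg hq, mpGo_eq_mpjGo, mpjGo_eq _ _ 0 (Or.inl rfl)]
    simp [pvChars]
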